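-- pv_equiv track=rewrite | github.com/PinochetLab/truth-table-match-find-algorithm | match_finder.py | to_index_map
-- ===== SOURCE A (Python) =====
-- def to_index_map(used):
--     n = len(used)
--     result = {}
--     idx = 0
--     for i in range(n):
--         if used[i] == '1':
--             result[i] = idx
--             idx += 1
--     return result
-- ===== SOURCE B (Python) =====
-- def to_index_map(used):
--     # Stateless: the rank of a '1' at position i is just the number of '1's before it.
--     return {i: used[:i].count('1') for i in range(len(used)) if used[i] == '1'}
-- ===== Notes on version B (the rewrite author's own statement) =====
-- stated objective: alternative
-- what changed: Replaces A's stateful single pass (a running idx counter incremented while inserting into the dict) with a stateless dict comprehension that computes each rank independently as the count of one-characters in the prefix strictly before the position; no counter or threaded state, trading the linear pass for quadratic per-position counting.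
import Mathlib
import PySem

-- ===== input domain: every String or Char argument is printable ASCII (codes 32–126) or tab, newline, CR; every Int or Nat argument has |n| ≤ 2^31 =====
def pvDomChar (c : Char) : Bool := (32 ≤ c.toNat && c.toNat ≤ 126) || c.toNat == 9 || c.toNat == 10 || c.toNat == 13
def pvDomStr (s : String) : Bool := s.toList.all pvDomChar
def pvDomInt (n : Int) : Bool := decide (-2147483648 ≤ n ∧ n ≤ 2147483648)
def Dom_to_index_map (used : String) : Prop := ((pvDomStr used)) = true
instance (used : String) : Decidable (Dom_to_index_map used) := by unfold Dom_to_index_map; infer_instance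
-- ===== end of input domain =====

-- B replaces A's stateful scan (running idx counter + dict insertion) by a stateless
-- comprehension computing each rank independently as used[:i].count('1'); objective: alternative.

-- ===== PORT A =====
-- the loop body: if used[i] == '1': result[i] = idx; idx += 1
def pvStepA (st : PySem.Dict Int Int × Int) (p : Int × Char) : PySem.Dict Int Int × Int :=
  if p.2 = '1' then (st.1.insert p.1 st.2, st.2 + 1) else st

-- 'for i in range(n): … used[i] …' iterated as enumerate over the characters (same indices i, same chars used[i])
def to_index_map (used : String) : List (Int × Int) :=
  ((PySem.List.enumerate used.toList 0).foldl pvStepA (PySem.Dict.empty, 0)).1.items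

-- ===== PORT B =====
-- {i: used[:i].count('1') for i in range(len(used)) if used[i] == '1'}
-- (the keys i are distinct, so the dict comprehension is exactly this list of pairs in order)
def to_index_map_alt (used : String) : List (Int × Int) :=
  ((PySem.List.pyRange 0 used.toList.length 1).filter
      (fun i => PySem.Str.pyGet? used i == some '1')).map
    (fun i => (i, (PySem.Str.count (PySem.Str.slice used none (some i)) "1" : Int)))

-- ===== PRECONDITION & SPEC =====
def Spec_to_index_map (used : String) (out : List (Int × Int)) : Prop := out = to_index_map_alt used
instance (used : String) (out : List (Int × Int)) : Decidable (Spec_to_index_map used out) := by unfold Spec_to_index_map; infer_instance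

-- ===== CLAIM (what is proved, stated in full; the proofs are below) =====
def Claim_equal_to_index_map : Prop := ∀ (used : String), Dom_to_index_map used → Spec_to_index_map used (to_index_map used)

-- ===== LEMMAS AND PROOFS =====

-- s.count(c) for a single character c is List.count (unfolds Chars.count.go once per character)
lemma pv_count_go_singleton (c : Char) (fuel : Nat) (l : List Char) (acc : Nat)
    (h : l.length ≤ fuel) :
    PySem.Chars.count.go [c] fuel l acc = acc + l.count c := by
  induction fuel generalizing l acc with
  | zero =>
    have hl : l = [] := List.eq_nil_of_length_eq_zero (Nat.le_zero.mp h)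
    subst hl; simp [PySem.Chars.count.go]
  | succ fuel ih =>
    cases l with
    | nil => simp [PySem.Chars.count.go]
    | cons x t =>
      simp only [PySem.Chars.count.go]
      by_cases hx : x = c
      · subst hx
        simp [List.isPrefixOf, ih t (acc + 1) (by simpa using Nat.le_of_succ_le_succ h)]
        omega
      · simp [List.isPrefixOf, hx, ih t acc (by simpa using Nat.le_of_succ_le_succ h), Ne.symm hx]

lemma pv_count_singleton (l : List Char) (c : Char) :
    PySem.Chars.count l [c] = l.count c := by
  simp [PySem.Chars.count, pv_count_go_singleton c l.length l 0 le_rfl]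

-- A's loop from any state: the inserted keys s, s+1, … are fresh for a dict whose keys are all < s,
-- so the items list extends by the ranked '1'-positions.
lemma pv_foldA_items (l : List Char) (s : Int) (d : PySem.Dict Int Int) (idx : Int)
    (hlt : ∀ k ∈ d.keys, k < s) (hnd : d.keys.Nodup) :
    ((PySem.List.enumerate l s).foldl pvStepA (d, idx)).1.items
      = d.items ++ (PySem.List.enumerate
          (((PySem.List.enumerate l s).filter (fun p => p.2 == '1')).map (·.1)) idx).map
          (fun p => (p.2, p.1)) := by
  induction l generalizing s d idx with
  | nil => simp [PySem.List.enumerate_nil]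
  | cons c l ih =>
    rw [PySem.List.enumerate_cons]
    by_cases hc : c = '1'
    · have hns : s ∉ d.keys := fun h => absurd (hlt s h) (lt_irrefl s)
      have hcont : d.contains s = false := by
        rw [PySem.Dict.contains_eq_decide_mem_keys]; simp [hns]
      have hstep : pvStepA (d, idx) (s, c) = (d.insert s idx, idx + 1) := by
        simp [pvStepA, hc]
      rw [List.foldl_cons, hstep,
        ih (s + 1) (d.insert s idx) (idx + 1)
          (by intro k hk
              rcases (PySem.Dict.mem_keys_insert d s k idx).mp hk with h | h
              · omega
              · have := hlt k h; omega)
          (PySem.Dict.nodup_keys_insert d s idx hnd)]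
      rw [PySem.Dict.items_insert_of_not_contains d idx hcont]
      simp [hc, PySem.List.enumerate_cons]
    · have hstep : pvStepA (d, idx) (s, c) = (d, idx) := by simp [pvStepA, hc]
      rw [List.foldl_cons, hstep, ih (s + 1) d idx (fun k hk => by have := hlt k hk; omega) hnd]
      simp [hc]

-- ranking the '1'-positions by enumerate equals pairing each with its prefix '1'-count
lemma pv_key (l : List Char) (s c : Nat) :
    (PySem.List.enumerate
        (((PySem.List.enumerate l (s : Int)).filter (fun p => p.2 == '1')).map (·.1))
        (c : Int)).map (fun p => (p.2, p.1))
      = ((List.range l.length).filter (fun j => l[j]? == some '1')).map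
          (fun j => (((s + j : Nat) : Int), ((c + (l.take j).count '1' : Nat) : Int))) := by
  induction l generalizing s c with
  | nil => simp [PySem.List.enumerate_nil]
  | cons x t ih =>
    rw [PySem.List.enumerate_cons]
    have h1 : ((c : Int) + 1) = ((c + 1 : Nat) : Int) := by push_cast; ring
    have h2 : ((s : Int) + 1) = ((s + 1 : Nat) : Int) := by push_cast; ring
    have hfil : List.filter ((fun j => (x :: t)[j]? == some '1') ∘ Nat.succ) (List.range t.length)
        = List.filter (fun j => t[j]? == some '1') (List.range t.length) :=
      List.filter_congr (fun j _ => by simp)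
    by_cases hx : x = '1'
    · subst hx
      simp only [List.length_cons, List.range_succ_eq_map, List.filter_cons,
        List.getElem?_cons_zero, beq_self_eq_true, if_true,
        List.filter_map, List.map_cons, List.map_map, PySem.List.enumerate_cons]
      refine congrArg₂ List.cons (by simp) ?_
      rw [h1, h2, ih (s + 1) (c + 1), hfil]
      apply List.map_congr_left
      intro j hj
      simp only [Function.comp, Nat.succ_eq_add_one, List.take_succ_cons,
        List.count_cons_self, Prod.mk.injEq]
      omega
    · simp only [List.length_cons, List.range_succ_eq_map, List.filter_cons,
        List.getElem?_cons_zero, List.filter_map]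
      rw [if_neg (by simp [hx]), if_neg (by simp [hx]), List.map_map]
      rw [h2, ih (s + 1) c, hfil]
      apply List.map_congr_left
      intro j hj
      have hcc : List.count '1' (x :: List.take j t) = List.count '1' (List.take j t) := by
        simp [hx]
      simp only [Function.comp, Nat.succ_eq_add_one, List.take_succ_cons, Prod.mk.injEq, hcc]
      refine ⟨by omega, trivial⟩


-- ===== VERDICT (by name: the statement is the Claim_ definition above) =====
theorem to_index_map_spec : Claim_equal_to_index_map := by
  intro used _
  show to_index_map used = to_index_map_alt used
  unfold to_index_map to_index_map_alt
  rw [pv_foldA_items used.toList 0 PySem.Dict.empty 0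
      (by simp [pysem]) (PySem.Dict.nodup_keys_empty),
    show ((PySem.Dict.empty : PySem.Dict Int Int).items) = [] from rfl, List.nil_append,
    show (0 : Int) = ((0 : Nat) : Int) from rfl, pv_key used.toList 0 0,
    PySem.List.pyRange_one, List.filter_map, List.map_map]
  simp only [Function.comp_def, Nat.cast_zero, zero_add, sub_zero, Int.toNat_natCast,
    PySem.Str.pyGet?_natCast]
  apply List.map_congr_left
  intro j hj
  simp [pv_count_singleton, PySem.List.slice_to_natCast,
    show ("1" : String).toList = ['1'] from by decide]
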